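-- pv_equiv track=rewrite | github.com/lucas-s-p/EstudosPython | P1 - U9/EX1.PY | filtra_alunos
-- ===== SOURCE A (Python) =====
-- def filtra_alunos(alunos, inscritos, media):
--     cont = 0
--     for i in range(len(alunos) -1, -1, -1):
--         if alunos[i][-1] < media:
--             alunos.pop(i)
--             cont += 1
--
--     for i in range(len(alunos) -1, -1, -1):
--         for j in range(len(inscritos)):
--             if alunos[i][0] == inscritos[j]:
--                 break
--             elif len(inscritos)-1 == j:
--                 alunos.pop(i)
--                 cont += 1
--
--     return cont
-- ===== SOURCE B (Python) =====
-- def filtra_alunos(alunos, inscritos, media):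
--     ins = set(inscritos)
--     mantidos = [a for a in alunos if a[-1] >= media and (not inscritos or a[0] in ins)]
--     cont = len(alunos) - len(mantidos)
--     alunos[:] = mantidos
--     return cont
-- ===== Notes on version B (the rewrite author's own statement) =====
-- stated objective: simpler
-- what changed: Replaces A's two backward index loops with O(n)-cost pops and a nested linear scan of inscritos by a single filter pass with a prebuilt set for membership; the count is len(alunos) - len(kept).
import Mathlib
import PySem

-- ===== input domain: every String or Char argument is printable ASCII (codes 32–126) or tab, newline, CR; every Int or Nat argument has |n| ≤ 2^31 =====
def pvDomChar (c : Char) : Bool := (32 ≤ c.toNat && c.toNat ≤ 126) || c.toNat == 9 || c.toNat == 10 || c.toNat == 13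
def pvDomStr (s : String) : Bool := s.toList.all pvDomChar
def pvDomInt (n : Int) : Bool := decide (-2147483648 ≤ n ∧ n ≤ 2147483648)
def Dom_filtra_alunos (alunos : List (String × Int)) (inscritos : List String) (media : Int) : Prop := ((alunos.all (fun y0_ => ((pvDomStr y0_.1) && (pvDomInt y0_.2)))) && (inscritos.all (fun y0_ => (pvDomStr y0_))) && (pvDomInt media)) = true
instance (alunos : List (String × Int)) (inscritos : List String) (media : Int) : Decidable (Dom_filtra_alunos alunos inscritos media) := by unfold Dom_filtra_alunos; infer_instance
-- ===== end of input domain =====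

-- B replaces A's two backward pop loops (the second with a nested scan of inscritos) by a
-- single filter pass, counting removals as len(alunos) - len(kept); equivalence is about the
-- RETURN value only (both Pythons mutate alunos in place to the same kept list).


-- ===== PORT A =====
-- first backward loop: i from len-1 down to 0, pop when grade < media (head is processed last,
-- so the recursion processes the tail's result first)
def pvLoop1 (media : Int) : List (String × Int) → List (String × Int) × Int
  | [] => ([], 0)
  | a :: rest =>
    let (l, c) := pvLoop1 media rest
    if a.2 < media then (l, c + 1) else (a :: l, c)

-- inner scan over inscritos: break on match, pop when j reaches the last index without a match
def pvInner (name : String) : List String → Bool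
  | [] => false
  | [x] => !(name == x)
  | x :: y :: rest => if name == x then false else pvInner name (y :: rest)

-- second backward loop over the survivors of the first
def pvLoop2 (inscritos : List String) : List (String × Int) → List (String × Int) × Int
  | [] => ([], 0)
  | a :: rest =>
    let (l, c) := pvLoop2 inscritos rest
    if pvInner a.1 inscritos then (l, c + 1) else (a :: l, c)

def filtra_alunos (alunos : List (String × Int)) (inscritos : List String) (media : Int) : Int :=
  let (l1, c1) := pvLoop1 media alunos
  let (_, c2) := pvLoop2 inscritos l1
  c1 + c2

-- ===== PORT B =====
def filtra_alunos_alt (alunos : List (String × Int)) (inscritos : List String) (media : Int) : Int :=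
  let ins : PySem.Set String := PySem.Set.ofList inscritos
  let mantidos := alunos.filter (fun a => decide (media ≤ a.2) && (inscritos.isEmpty || ins.contains a.1))
  (alunos.length : Int) - (mantidos.length : Int)

-- ===== PRECONDITION & SPEC =====
def Spec_filtra_alunos (alunos : List (String × Int)) (inscritos : List String) (media : Int) (out : Int) : Prop := out = filtra_alunos_alt alunos inscritos media
instance (alunos : List (String × Int)) (inscritos : List String) (media : Int) (out : Int) : Decidable (Spec_filtra_alunos alunos inscritos media out) := by unfold Spec_filtra_alunos; infer_instance

-- ===== CLAIM (what is proved, stated in full; the proofs are below) =====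
def Claim_equal_filtra_alunos : Prop := ∀ (alunos : List (String × Int)) (inscritos : List String) (media : Int), Dom_filtra_alunos alunos inscritos media → Spec_filtra_alunos alunos inscritos media (filtra_alunos alunos inscritos media)

-- ===== LEMMAS AND PROOFS =====

lemma pvInner_eq (name : String) : ∀ ins : List String,
    pvInner name ins = !(ins.isEmpty || ins.contains name)
  | [] => by simp [pvInner]
  | [x] => by by_cases h : name = x <;> simp [pvInner, h]
  | x :: y :: rest => by
    by_cases h : name = x
    · simp [pvInner, h]
    · rw [show pvInner name (x :: y :: rest) = pvInner name (y :: rest) from by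
        simp [pvInner, h], pvInner_eq name (y :: rest)]
      simp only [List.isEmpty_cons, List.contains_cons, Bool.false_or]
      have hx : (x == name) = false := by simp [Ne.symm h]
      simp [hx]
      exact fun _ _ => h

lemma pvLoop1_eq (media : Int) : ∀ l : List (String × Int),
    pvLoop1 media l = (l.filter (fun a => decide (media ≤ a.2)),
      (l.length : Int) - ((l.filter (fun a => decide (media ≤ a.2))).length : Int))
  | [] => by simp [pvLoop1]
  | a :: rest => by
    have ih := pvLoop1_eq media rest
    by_cases h : a.2 < media
    · have h' : ¬ media ≤ a.2 := not_le.mpr h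
      simp only [pvLoop1, ih, if_pos h, List.filter_cons, decide_eq_false h',
        Bool.false_eq_true, if_false, List.length_cons, Prod.mk.injEq]
      first
      | (refine ⟨by trivial, ?_⟩; push_cast; ring)
      | (push_cast; ring)
    · have h' : media ≤ a.2 := not_lt.mp h
      simp only [pvLoop1, ih, if_neg h, List.filter_cons, decide_eq_true h',
        if_true, List.length_cons, Prod.mk.injEq]
      first
      | (refine ⟨by trivial, ?_⟩; push_cast; ring)
      | (push_cast; ring)

lemma pvLoop2_eq (inscritos : List String) : ∀ l : List (String × Int),
    pvLoop2 inscritos l = (l.filter (fun a => !pvInner a.1 inscritos),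
      (l.length : Int) - ((l.filter (fun a => !pvInner a.1 inscritos)).length : Int))
  | [] => by simp [pvLoop2]
  | a :: rest => by
    have ih := pvLoop2_eq inscritos rest
    by_cases h : pvInner a.1 inscritos
    · simp only [pvLoop2, ih, if_pos h, List.filter_cons, h, Bool.not_true,
        Bool.false_eq_true, if_false, List.length_cons, Prod.mk.injEq]
      first
      | (refine ⟨by trivial, ?_⟩; push_cast; ring)
      | (push_cast; ring)
    · have h' : (!pvInner a.1 inscritos) = true := by simp [h]
      simp only [pvLoop2, ih, if_neg h, List.filter_cons, h', if_true,
        List.length_cons, Prod.mk.injEq]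
      first
      | (refine ⟨by trivial, ?_⟩; push_cast; ring)
      | (push_cast; ring)

lemma contains_ofList (xs : List String) (x : String) :
    (PySem.Set.ofList xs).contains x = xs.contains x := by
  have h := PySem.Set.mem_ofList xs x
  cases hc : (PySem.Set.ofList xs).contains x <;> cases hc2 : xs.contains x <;>
    simp_all

-- ===== VERDICT (by name: the statement is the Claim_ definition above) =====
theorem filtra_alunos_spec : Claim_equal_filtra_alunos := by
  intro alunos inscritos media _
  show filtra_alunos alunos inscritos media = filtra_alunos_alt alunos inscritos media
  unfold filtra_alunos filtra_alunos_alt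
  rw [pvLoop1_eq]
  simp only [pvLoop2_eq, List.filter_filter]
  have hpred : ∀ a : String × Int,
      ((!pvInner a.1 inscritos) && decide (media ≤ a.2)) =
      (decide (media ≤ a.2) && (inscritos.isEmpty || (PySem.Set.ofList inscritos).contains a.1)) := by
    intro a
    rw [pvInner_eq, contains_ofList]
    cases decide (media ≤ a.2) <;> cases inscritos.isEmpty <;>
      cases inscritos.contains a.1 <;> rfl
  simp only [hpred]
  ring
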